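-- pv_equiv track=rewrite | github.com/AdiffZulkifli/Container_Info_AI_Flask | VS OCR, NLP and ID Detection/server.py | clean_and_correct_text
-- ===== SOURCE A (Python) =====
-- def clean_and_correct_text(text):
--     """Fix common OCR mistakes in container IDs."""
--     text = text.upper().replace(" ", "")
--     corrections = {
--         "0": "O",
--         "1": "I",
--         "5": "S",
--         "8": "B"
--     }
--     if len(text) >= 4:
--         corrected = ""
--         for i, ch in enumerate(text):
--             if i < 4 and ch in corrections:
--                 corrected += corrections[ch]
--             else:
--                 corrected += ch
--         text = corrected
--     return text
-- ===== SOURCE B (Python) =====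
-- _TABLE = str.maketrans({"0": "O", "1": "I", "5": "S", "8": "B"})
--
-- def clean_and_correct_text(text):
--     """Fix common OCR mistakes in container IDs."""
--     text = text.upper().replace(" ", "")
--     if len(text) >= 4:
--         text = text[:4].translate(_TABLE) + text[4:]
--     return text
-- ===== Notes on version B (the rewrite author's own statement) =====
-- stated objective: idiomatic
-- what changed: Replaced the indexed enumerate loop with per-character dict membership tests and repeated string concatenation by a single str.translate over the 4-char prefix plus the untouched suffix.
import Mathlib
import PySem

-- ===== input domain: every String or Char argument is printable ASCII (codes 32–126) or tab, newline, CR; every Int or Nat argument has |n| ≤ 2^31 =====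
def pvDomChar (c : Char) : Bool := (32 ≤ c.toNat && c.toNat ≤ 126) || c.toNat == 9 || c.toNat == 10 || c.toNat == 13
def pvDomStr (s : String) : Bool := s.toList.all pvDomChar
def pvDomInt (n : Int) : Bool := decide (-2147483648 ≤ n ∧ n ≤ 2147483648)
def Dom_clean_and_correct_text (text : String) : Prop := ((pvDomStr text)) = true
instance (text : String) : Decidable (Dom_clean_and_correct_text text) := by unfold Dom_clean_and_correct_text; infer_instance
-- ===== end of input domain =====

-- B replaces A's enumerate loop (per-char dict tests, string concatenation) by a
-- translation table applied to the 4-char prefix with the suffix passed through (idiomatic).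

-- ===== PORT A =====
def pvCorrections : PySem.Dict String String :=
  (((PySem.Dict.empty.insert "0" "O").insert "1" "I").insert "5" "S").insert "8" "B"

def clean_and_correct_text (text : String) : String :=
  let text := PySem.Str.replace (PySem.Str.upper text) " " ""
  if 4 ≤ PySem.Str.len text then
    let corrected := (PySem.List.enumerate text.toList 0).foldl
      (fun acc p =>
        if p.1 < 4 && (pvCorrections.get? (String.ofList [p.2])).isSome then
          acc ++ (pvCorrections.getD (String.ofList [p.2]) "")
        else
          acc ++ String.ofList [p.2]) ""
    corrected
  else text

-- ===== PORT B =====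
-- the translation table of Source B, as a function on characters
def pvTable (c : Char) : Char :=
  if c = '0' then 'O' else if c = '1' then 'I' else if c = '5' then 'S'
  else if c = '8' then 'B' else c

def clean_and_correct_text_alt (text : String) : String :=
  let text := PySem.Str.replace (PySem.Str.upper text) " " ""
  if 4 ≤ PySem.Str.len text then
    String.ofList ((text.toList.take 4).map pvTable ++ text.toList.drop 4)
  else text

-- ===== PRECONDITION & SPEC =====
def Spec_clean_and_correct_text (text : String) (out : String) : Prop := out = clean_and_correct_text_alt text
instance (text : String) (out : String) : Decidable (Spec_clean_and_correct_text text out) := by unfold Spec_clean_and_correct_text; infer_instance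

-- ===== CLAIM (what is proved, stated in full; the proofs are below) =====
def Claim_equal_clean_and_correct_text : Prop := ∀ (text : String), Dom_clean_and_correct_text text → Spec_clean_and_correct_text text (clean_and_correct_text text)

-- ===== LEMMAS AND PROOFS =====

-- one step of A's loop appends the (possibly corrected) character
theorem pv_step (acc : String) (i : Int) (c : Char) :
    (if i < 4 && (pvCorrections.get? (String.ofList [c])).isSome then
       acc ++ (pvCorrections.getD (String.ofList [c]) "")
     else acc ++ String.ofList [c])
    = acc ++ String.ofList [if i < 4 then pvTable c else c] := by
  by_cases hi : i < 4
  · by_cases h0 : c = '0'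
    · subst h0
      have h : pvCorrections.getD (String.ofList ['0']) "" = "O" := by decide
      have h' : pvCorrections.get? (String.ofList ['0']) = some "O" := by decide
      simp [hi, h, h', pvTable]
    · by_cases h1 : c = '1'
      · subst h1
        have h : pvCorrections.getD (String.ofList ['1']) "" = "I" := by decide
        have h' : pvCorrections.get? (String.ofList ['1']) = some "I" := by decide
        simp [hi, h, h', pvTable]
      · by_cases h5 : c = '5'
        · subst h5
          have h : pvCorrections.getD (String.ofList ['5']) "" = "S" := by decide
          have h' : pvCorrections.get? (String.ofList ['5']) = some "S" := by decide
          simp [hi, h, h', pvTable]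
        · by_cases h8 : c = '8'
          · subst h8
            have h : pvCorrections.getD (String.ofList ['8']) "" = "B" := by decide
            have h' : pvCorrections.get? (String.ofList ['8']) = some "B" := by decide
            simp [hi, h, h', pvTable]
          · have hnone : pvCorrections.get? (String.ofList [c]) = none := by
              simp [pvCorrections, PySem.Dict.get?, PySem.Dict.insert, PySem.Dict.empty]
              refine ⟨?_, ?_, ?_, ?_⟩ <;> intro h <;>
                first
                | exact h0 (by simpa using congrArg String.toList h.symm)
                | exact h1 (by simpa using congrArg String.toList h.symm)
                | exact h5 (by simpa using congrArg String.toList h.symm)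
                | exact h8 (by simpa using congrArg String.toList h.symm)
            simp [hnone, hi, pvTable, h0, h1, h5, h8]
  · simp [hi]

-- appending a singleton string
theorem pv_mk_append (acc : List Char) (x : Char) :
    String.ofList acc ++ String.ofList [x] = String.ofList (acc ++ [x]) := by
  apply String.toList_injective; simp

-- A's foldl over enumerate, started at Nat index s, produces B's prefix-map form
theorem pv_loop (l : List Char) (s : Nat) (acc : List Char) :
    (PySem.List.enumerate l (s : Int)).foldl
      (fun acc p =>
        if p.1 < 4 && (pvCorrections.get? (String.ofList [p.2])).isSome then
          acc ++ (pvCorrections.getD (String.ofList [p.2]) "")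
        else acc ++ String.ofList [p.2]) (String.ofList acc)
    = String.ofList (acc ++ (l.take (4 - s)).map pvTable ++ l.drop (4 - s)) := by
  induction l generalizing s acc with
  | nil => simp [PySem.List.enumerate_nil]
  | cons c t ih =>
    rw [PySem.List.enumerate_cons, List.foldl_cons, pv_step, pv_mk_append]
    have hc : ((s : Int) + 1) = ((s + 1 : Nat) : Int) := by push_cast; ring
    rw [hc, ih (s + 1)]
    by_cases hs : s < 4
    · have h4 : ((s : Int) < 4) := by exact_mod_cast hs
      have he : 4 - s = (4 - (s + 1)) + 1 := by omega
      simp [h4, he, List.take_succ_cons, List.drop_succ_cons]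
    · have h4 : ¬ ((s : Int) < 4) := by exact_mod_cast hs
      have hz : 4 - s = 0 := by omega
      have hz1 : 4 - (s + 1) = 0 := by omega
      simp [h4, hz, hz1]

-- ===== VERDICT (by name: the statement is the Claim_ definition above) =====
theorem clean_and_correct_text_spec : Claim_equal_clean_and_correct_text := by
  intro text _
  unfold Spec_clean_and_correct_text clean_and_correct_text clean_and_correct_text_alt
  by_cases h : 4 ≤ PySem.Str.len (PySem.Str.replace (PySem.Str.upper text) " " "")
  · simp only [h, if_pos]
    have := pv_loop (PySem.Str.replace (PySem.Str.upper text) " " "").toList 0 []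
    simp only [Nat.cast_zero, List.nil_append, Nat.sub_zero] at this
    simpa using this
  · simp only [h, if_neg, not_false_iff]
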